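-- pv_equiv track=rewrite | github.com/Jerry-Wan/CSCI-UA102 | Assignment2/Question5_vc_count.py | vc
-- ===== SOURCE A (Python) =====
-- def vc(word, vowels, consonants,a):
--     if a == len(word):
--         return [vowels,consonants]
--     elif(word[a]== 'a' or word[a] == 'e' or word[a] == 'i' or word[a] == 'o' or word[a] == 'u'
--        or word[a] == 'A' or word[a] == 'E' or word[a] == 'I' or word[a] == 'O' or word[a] == 'U'):
--         vowels = vowels + 1
--         newA = a+1
--         return vc(word, vowels, consonants,newA)
--     else:
--         consonants = consonants + 1
--         newA = a+1
--         return vc(word, vowels, consonants,newA)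
-- ===== SOURCE B (Python) =====
-- def vc(word, vowels, consonants, a):
--     rest = word[a:]
--     nv = sum(ch in "aeiouAEIOU" for ch in rest)
--     return [vowels + nv, consonants + len(rest) - nv]
-- ===== Notes on version B (the rewrite author's own statement) =====
-- stated objective: simpler
-- what changed: Replaces the per-character Python-level recursion with one slice plus a single vowel count and a closed-form consonant count (len(rest) - nv), removing the recursive call chain and its O(n) stack frames.
-- intended difference: For a negative start index a (with -len(word) <= a <= -1) A's negative-index wraparound counts the last -a characters and then the whole word again, while B counts exactly the suffix word[a:], which is the intended meaning of a start position. — e.g. on vc("b", 0, 0, -1): A returns [0, 2], B returns [0, 1]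
import Mathlib
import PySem

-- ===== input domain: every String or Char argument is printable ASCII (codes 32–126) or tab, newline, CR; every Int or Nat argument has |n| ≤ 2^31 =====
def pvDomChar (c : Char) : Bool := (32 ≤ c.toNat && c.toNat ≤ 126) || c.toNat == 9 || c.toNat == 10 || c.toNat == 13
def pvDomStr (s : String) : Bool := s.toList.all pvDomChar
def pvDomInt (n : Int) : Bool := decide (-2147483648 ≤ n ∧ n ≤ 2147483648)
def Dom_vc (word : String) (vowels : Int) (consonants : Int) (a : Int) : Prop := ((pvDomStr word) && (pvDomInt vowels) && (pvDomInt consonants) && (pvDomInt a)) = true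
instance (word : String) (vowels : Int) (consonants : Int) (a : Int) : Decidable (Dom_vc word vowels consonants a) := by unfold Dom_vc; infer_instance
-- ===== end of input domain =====

-- B replaces A's per-character recursion by one slice plus a vowel count with a closed-form
-- consonant count; return-value equivalence is proved for all non-negative start indices a
-- admitted by Pre_vc, with the negative-a wraparound of A stated as an intended difference D_vc.

-- ===== PORT A =====
-- literal transliteration of A's recursion; the `none` branch is Python's IndexError (outside Pre_vc)
def vc (word : String) (vowels : Int) (consonants : Int) (a : Int) : List Int :=
  if a = PySem.Str.len word then [vowels, consonants]
  else
    match h : PySem.Str.pyGet? word a with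
    | none => []  -- word[a] raises IndexError here; excluded by Pre_vc
    | some ch =>
      if ch == 'a' || ch == 'e' || ch == 'i' || ch == 'o' || ch == 'u'
         || ch == 'A' || ch == 'E' || ch == 'I' || ch == 'O' || ch == 'U' then
        vc word (vowels + 1) consonants (a + 1)
      else
        vc word vowels (consonants + 1) (a + 1)
termination_by (PySem.Str.len word - a).toNat
decreasing_by
  all_goals
    have hr : PySem.Raise.InRange word.toList.length a := by
      by_contra hnr
      rw [show PySem.Str.pyGet? word a = PySem.List.pyGet? word.toList a from by
            simp [PySem.Str.pyGet?],
          (PySem.List.pyGet?_eq_none_iff _ _).mpr hnr] at h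
      simp at h
    rcases hr with ⟨h1, h2⟩
    simp [PySem.Str.len] at *
    omega

-- ===== PORT B =====
def vc_alt (word : String) (vowels : Int) (consonants : Int) (a : Int) : List Int :=
  let rest := PySem.Str.slice word (some a) none
  -- sum(ch in "aeiouAEIOU" for ch in rest), char membership in the 10-vowel string
  let nv : Int := (rest.toList.countP (fun ch => ("aeiouAEIOU".toList).contains ch) : Nat)
  [vowels + nv, consonants + PySem.Str.len rest - nv]

-- ===== PRECONDITION & SPEC =====
-- Pre_vc is exactly where A returns: for a > len(word) or a < -len(word) the recursion hits IndexError.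
def Pre_vc (word : String) (vowels : Int) (consonants : Int) (a : Int) : Prop :=
  -(PySem.Str.len word) ≤ a ∧ a ≤ PySem.Str.len word
instance (word : String) (vowels : Int) (consonants : Int) (a : Int) : Decidable (Pre_vc word vowels consonants a) := by unfold Pre_vc; infer_instance
def pvWitness_vc : String × Int × Int × Int := ("Hello", 1, 2, 0)

-- For a negative start index a (-len ≤ a ≤ -1) A's negative-index wraparound counts the last -a
-- characters and then the whole word again, while B counts exactly the suffix word[a:], the
-- intended meaning of a start position.
def D_vc (word : String) (vowels : Int) (consonants : Int) (a : Int) : Prop := a < 0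
instance (word : String) (vowels : Int) (consonants : Int) (a : Int) : Decidable (D_vc word vowels consonants a) := by unfold D_vc; infer_instance

def Spec_vc (word : String) (vowels : Int) (consonants : Int) (a : Int) (out : List Int) : Prop :=
  ¬ D_vc word vowels consonants a → out = vc_alt word vowels consonants a
instance (word : String) (vowels : Int) (consonants : Int) (a : Int) (out : List Int) : Decidable (Spec_vc word vowels consonants a out) := by unfold Spec_vc; infer_instance

def pvDiffWitness_vc : String × Int × Int × Int := ("b", 0, 0, -1)
def pvDiffWitnessOut_vc : (List Int) × (List Int) := ([0, 2], [0, 1])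

-- ===== CLAIM (what is proved, stated in full; the proofs are below) =====
def Claim_unchanged_vc : Prop := ∀ (word : String) (vowels : Int) (consonants : Int) (a : Int), Dom_vc word vowels consonants a → Pre_vc word vowels consonants a → Spec_vc word vowels consonants a (vc word vowels consonants a)
def Claim_changed_vc : Prop := Dom_vc (pvDiffWitness_vc.1) (pvDiffWitness_vc.2.1) (pvDiffWitness_vc.2.2.1) (pvDiffWitness_vc.2.2.2) ∧ Pre_vc (pvDiffWitness_vc.1) (pvDiffWitness_vc.2.1) (pvDiffWitness_vc.2.2.1) (pvDiffWitness_vc.2.2.2) ∧ D_vc (pvDiffWitness_vc.1) (pvDiffWitness_vc.2.1) (pvDiffWitness_vc.2.2.1) (pvDiffWitness_vc.2.2.2) ∧ vc (pvDiffWitness_vc.1) (pvDiffWitness_vc.2.1) (pvDiffWitness_vc.2.2.1) (pvDiffWitness_vc.2.2.2) = pvDiffWitnessOut_vc.1 ∧ vc_alt (pvDiffWitness_vc.1) (pvDiffWitness_vc.2.1) (pvDiffWitness_vc.2.2.1) (pvDiffWitness_vc.2.2.2) = pvDiffWitnessOut_vc.2 ∧ pvDiffWitnessOut_vc.1 ≠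 pvDiffWitnessOut_vc.2
def Claim_exact_vc : Prop := ∀ (word : String) (vowels : Int) (consonants : Int) (a : Int), Dom_vc word vowels consonants a → Pre_vc word vowels consonants a → D_vc word vowels consonants a → vc word vowels consonants a ≠ vc_alt word vowels consonants a
-- ===== LEMMAS AND PROOFS =====

theorem vowels_toList : "aeiouAEIOU".toList = ['a','e','i','o','u','A','E','I','O','U'] := by
  decide

theorem vowel_pred_eq (ch : Char) :
    ("aeiouAEIOU".toList).contains ch =
      (ch == 'a' || ch == 'e' || ch == 'i' || ch == 'o' || ch == 'u'
       || ch == 'A' || ch == 'E' || ch == 'I' || ch == 'O' || ch == 'U') := by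
  rw [vowels_toList]
  simp only [List.contains_cons, List.contains_nil, Bool.or_false, Bool.or_assoc]

theorem vc_eq_counts (word : String) : ∀ (k : Nat) (v c : Int) (n : Nat),
    word.toList.length - n = k → n ≤ word.toList.length →
    vc word v c (n : Int) =
      [v + ((word.toList.drop n).countP (fun ch => ("aeiouAEIOU".toList).contains ch) : Int),
       c + (((word.toList.drop n).length : Int)
            - ((word.toList.drop n).countP (fun ch => ("aeiouAEIOU".toList).contains ch) : Int))] := by
  intro k
  induction k with
  | zero =>
    intro v c n hk h
    have hn : n = word.toList.length := by omega
    rw [vc, if_pos (by rw [PySem.Str.len_eq, hn])]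
    rw [hn, List.drop_length]
    simp
  | succ k ih =>
    intro v c n hk h
    have hlt : n < word.toList.length := by omega
    have hget : PySem.Str.pyGet? word (n : Int) = some (word.toList[n]) := by
      simp [List.getElem?_eq_getElem hlt]
    rw [vc, if_neg (by rw [PySem.Str.len_eq]; omega)]
    have hdrop : word.toList.drop n = word.toList[n] :: word.toList.drop (n + 1) :=
      (List.getElem_cons_drop hlt).symm
    have hcast : (n : Int) + 1 = ((n + 1 : Nat) : Int) := by push_cast; ring
    split
    · next h => rw [hget] at h; simp at h
    · next ch h =>
      rw [hget] at h
      injection h with h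
      subst h
      by_cases hv : ("aeiouAEIOU".toList).contains (word.toList[n]) = true
      · rw [if_pos (by rw [← vowel_pred_eq]; exact hv)]
        rw [hcast, ih (v + 1) c (n + 1) (by omega) (by omega), hdrop]
        simp only [List.countP_cons, List.length_cons, hv, ite_true, ite_false,
          Bool.false_eq_true, List.cons.injEq, and_true]
        push_cast
        omega
      · rw [if_neg (by rw [← vowel_pred_eq]; exact hv)]
        rw [hcast, ih v (c + 1) (n + 1) (by omega) (by omega), hdrop]
        simp only [List.countP_cons, List.length_cons, hv, ite_true, ite_false,
          Bool.false_eq_true, List.cons.injEq, and_true]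
        push_cast
        omega

theorem vc_sum (word : String) : ∀ (k : Nat) (v c : Int) (a : Int),
    -(word.toList.length : Int) ≤ a → a ≤ (word.toList.length : Int) →
    ((word.toList.length : Int) - a).toNat = k →
    (vc word v c a).sum = v + c + ((word.toList.length : Int) - a) := by
  intro k
  induction k with
  | zero =>
    intro v c a h1 h2 hk
    have ha : a = (word.toList.length : Int) := by omega
    rw [vc, if_pos (by rw [PySem.Str.len_eq]; omega)]
    simp [ha]
  | succ k ih =>
    intro v c a h1 h2 hk
    have hlt : a < (word.toList.length : Int) := by omega
    have hr : PySem.Raise.InRange word.toList.length a := ⟨h1, hlt⟩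
    rw [vc, if_neg (by rw [PySem.Str.len_eq]; omega)]
    split
    · next h =>
      rw [show PySem.Str.pyGet? word a = PySem.List.pyGet? word.toList a from by
            simp [PySem.Str.pyGet?]] at h
      rw [PySem.List.pyGet?_eq_none_iff] at h
      exact absurd hr h
    · next ch h =>
      split
      · rw [ih (v + 1) c (a + 1) (by omega) (by omega) (by omega)]; ring
      · rw [ih v (c + 1) (a + 1) (by omega) (by omega) (by omega)]; ring

theorem vc_alt_eval (word : String) (v c a : Int) :
    vc_alt word v c a =
      [v + (((PySem.List.slice word.toList (some a) none).countP (fun ch => ("aeiouAEIOU".toList).contains ch) : Nat) : Int),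
       c + (((PySem.List.slice word.toList (some a) none).length : Int))
            - (((PySem.List.slice word.toList (some a) none).countP (fun ch => ("aeiouAEIOU".toList).contains ch) : Nat) : Int)] := by
  simp only [vc_alt, PySem.Str.len_eq, PySem.Str.toList_slice, PySem.Chars.slice_eq_listSlice]

-- ===== VERDICT (by name: the statement is the Claim_ definition above) =====
theorem vc_spec : Claim_unchanged_vc := by
  intro word v c a _ hpre hD
  have ha : 0 ≤ a := by unfold D_vc at hD; omega
  have hle : a ≤ (word.toList.length : Int) := by
    have := hpre.2; rw [PySem.Str.len_eq] at this; exact this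
  have hcast : a = ((a.toNat : Nat) : Int) := (Int.toNat_of_nonneg ha).symm
  rw [hcast, vc_eq_counts word (word.toList.length - a.toNat) v c a.toNat rfl (by omega),
      vc_alt_eval, PySem.List.slice_from word.toList (Int.natCast_nonneg _)]
  rw [Int.toNat_natCast]
  simp only [List.cons.injEq, and_true]
  exact ⟨trivial, by ring⟩

theorem vc_changed : Claim_changed_vc := by
  unfold Claim_changed_vc
  refine ⟨by decide, by decide, by decide, ?_, by decide, by decide⟩
  show vc "b" 0 0 (-1) = [0, 2]
  rw [vc, if_neg (by decide)]
  split
  · next h => exact absurd h (by decide)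
  · next ch h =>
    rw [show PySem.Str.pyGet? "b" (-1) = some 'b' from by decide] at h
    obtain rfl : ch = 'b' := by injection h with h; exact h.symm
    rw [if_neg (by decide)]
    have h0 := vc_eq_counts "b" 1 0 1 0 rfl (by decide)
    simp only [Nat.cast_zero] at h0
    rw [show (-1 : Int) + 1 = 0 from by norm_num, show (0 : Int) + 1 = 1 from by norm_num, h0]
    decide

theorem vc_tight : Claim_exact_vc := by
  intro word v c a _ hpre hD heq
  have h1 : -(word.toList.length : Int) ≤ a := by
    have := hpre.1; rw [PySem.Str.len_eq] at this; exact this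
  have h2 : a ≤ (word.toList.length : Int) := by
    have := hpre.2; rw [PySem.Str.len_eq] at this; exact this
  have hneg : a < 0 := hD
  have hs := congrArg List.sum heq
  rw [vc_sum word ((word.toList.length : Int) - a).toNat v c a h1 h2 rfl, vc_alt_eval] at hs
  have hlen : (PySem.List.slice word.toList (some a) none).length ≤ word.toList.length := by
    rw [PySem.List.slice_some_none]
    simp [List.length_drop]
  simp only [List.sum_cons, List.sum_nil, add_zero] at hs
  omega
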